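-- pv_equiv track=rewrite | github.com/RoadToExclusivity/PP | Lab3/main.py | get_iterations_partition
-- ===== SOURCE A (Python) =====
-- ONE_ITERATION_MINIMUM_SIZE = 200000
--
-- def get_iterations_partition(iterations, process_count):
--     partition = []
--
--     while iterations > 0:
--         if ONE_ITERATION_MINIMUM_SIZE * process_count <= iterations:
--             for i in range(process_count):
--                 partition.append(ONE_ITERATION_MINIMUM_SIZE)
--             iterations -= ONE_ITERATION_MINIMUM_SIZE * process_count
--         else:
--             for i in range(process_count):
--                 cur_partition = iterations // (process_count - i)
--                 iterations -= cur_partition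
--                 partition.append(cur_partition)
--
--     return partition
-- ===== SOURCE B (Python) =====
-- ONE_ITERATION_MINIMUM_SIZE = 200000
--
-- def get_iterations_partition(iterations, process_count):
--     if iterations <= 0:
--         return []
--     q = iterations // (ONE_ITERATION_MINIMUM_SIZE * process_count)
--     partition = [ONE_ITERATION_MINIMUM_SIZE] * (process_count * q)
--     r = iterations - ONE_ITERATION_MINIMUM_SIZE * process_count * q
--     if r > 0:
--         base, rem = divmod(r, process_count)
--         partition += [base] * (process_count - rem) + [base + 1] * rem
--     return partition
-- ===== Notes on version B (the rewrite author's own statement) =====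
-- stated objective: faster
-- what changed: Replaces the while-loop of repeated subtraction plus the greedy inner division loop by closed-form arithmetic: q = iterations // (MIN*process_count) full rounds built with list multiplication, and the remainder spread via one divmod as [base]*(pc-rem) + [base+1]*rem.
import Mathlib
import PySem

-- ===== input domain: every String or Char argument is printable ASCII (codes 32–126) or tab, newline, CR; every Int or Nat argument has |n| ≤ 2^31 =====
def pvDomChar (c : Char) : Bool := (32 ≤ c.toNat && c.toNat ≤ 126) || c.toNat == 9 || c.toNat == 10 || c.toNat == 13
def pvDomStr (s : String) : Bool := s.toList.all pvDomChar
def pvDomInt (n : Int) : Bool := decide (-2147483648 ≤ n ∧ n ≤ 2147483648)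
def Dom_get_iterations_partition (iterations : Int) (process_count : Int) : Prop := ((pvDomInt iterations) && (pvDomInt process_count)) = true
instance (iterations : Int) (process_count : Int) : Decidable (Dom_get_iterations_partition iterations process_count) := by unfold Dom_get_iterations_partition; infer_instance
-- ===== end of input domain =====

-- B replaces A's while-loop of repeated subtraction and its greedy inner division loop by
-- closed-form quotient/divmod arithmetic and list replication (objective: faster, constant-factor).

-- ===== PORT A =====
def pvMinSize : Int := 200000  -- ONE_ITERATION_MINIMUM_SIZE

-- The while-loop of A, with fuel; inside Pre_ (iterations ≤ 0 ∨ 1 ≤ process_count) the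
-- fuel `iterations.toNat + 1` is never exhausted (Python A does not terminate outside Pre_).
def get_iterations_partitionLoop (pc : Int) : Nat → Int → List Int → List Int
  | 0, _, part => part
  | fuel+1, it, part =>
    if it > 0 then
      if pvMinSize * pc ≤ it then
        -- for i in range(process_count): partition.append(MIN)
        get_iterations_partitionLoop pc fuel (it - pvMinSize * pc)
          ((PySem.List.pyRange 0 pc 1).foldl (fun acc _ => acc ++ [pvMinSize]) part)
      else
        -- for i in range(process_count): cur = it // (pc - i); it -= cur; partition.append(cur)
        let st := (PySem.List.pyRange 0 pc 1).foldl
          (fun (st : Int × List Int) i =>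
            let cur := PySem.Int.floordiv st.1 (pc - i)
            (st.1 - cur, st.2 ++ [cur])) (it, part)
        get_iterations_partitionLoop pc fuel st.1 st.2
    else part

def get_iterations_partition (iterations : Int) (process_count : Int) : List Int :=
  get_iterations_partitionLoop process_count (iterations.toNat + 1) iterations []

-- ===== PORT B =====
def get_iterations_partition_alt (iterations : Int) (process_count : Int) : List Int :=
  if iterations ≤ 0 then []
  else
    let q := PySem.Int.floordiv iterations (pvMinSize * process_count)
    let partition := List.replicate (process_count * q).toNat pvMinSize
    let r := iterations - pvMinSize * process_count * q
    if r > 0 then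
      let base := PySem.Int.floordiv r process_count
      let rem := PySem.Int.mod r process_count
      partition ++ (List.replicate (process_count - rem).toNat base
                    ++ List.replicate rem.toNat (base + 1))
    else partition

-- ===== PRECONDITION & SPEC =====
-- Pre_ excludes exactly the inputs (iterations > 0 with process_count ≤ 0) on which the
-- Python A loops forever and returns nothing.
def Pre_get_iterations_partition (iterations : Int) (process_count : Int) : Prop :=
  iterations ≤ 0 ∨ 1 ≤ process_count
instance (iterations : Int) (process_count : Int) : Decidable (Pre_get_iterations_partition iterations process_count) := by unfold Pre_get_iterations_partition; infer_instance

def pvWitness_get_iterations_partition : Int × Int := (400001, 2)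

def Spec_get_iterations_partition (iterations : Int) (process_count : Int) (out : List Int) : Prop := out = get_iterations_partition_alt iterations process_count
instance (iterations : Int) (process_count : Int) (out : List Int) : Decidable (Spec_get_iterations_partition iterations process_count out) := by unfold Spec_get_iterations_partition; infer_instance

-- ===== CLAIM (what is proved, stated in full; the proofs are below) =====
def Claim_equal_get_iterations_partition : Prop := ∀ (iterations : Int) (process_count : Int), Dom_get_iterations_partition iterations process_count → Pre_get_iterations_partition iterations process_count → Spec_get_iterations_partition iterations process_count (get_iterations_partition iterations process_count)

-- ===== LEMMAS AND PROOFS =====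

-- The greedy remainder distribution of A's inner loop, as a recursion on the number of
-- remaining slots: gstep k r = (final iterations value, the list of appended chunks).
def gstep : Nat → Int → Int × List Int
  | 0, r => (r, [])
  | k+1, r =>
    let c := PySem.Int.floordiv r (k+1)
    let s := gstep k (r - c)
    (s.1, c :: s.2)

lemma inner_fold_eq_gstep (pc : Int) :
    ∀ (n : Nat) (j r : Int) (part : List Int), pc - j = (n : Int) →
    (PySem.List.pyRange j pc 1).foldl
        (fun (st : Int × List Int) i =>
          let cur := PySem.Int.floordiv st.1 (pc - i)
          (st.1 - cur, st.2 ++ [cur])) (r, part)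
      = ((gstep n r).1, part ++ (gstep n r).2) := by
  intro n
  induction n with
  | zero =>
    intro j r part h
    rw [PySem.List.pyRange_one_eq_nil (by omega)]
    simp [gstep]
  | succ k ih =>
    intro j r part h
    rw [PySem.List.pyRange_one_cons (by omega)]
    simp only [List.foldl_cons]
    have hd : pc - j = ((k+1 : Nat) : Int) := by push_cast; omega
    rw [hd]
    rw [ih (j+1) (r - PySem.Int.floordiv r ((k+1 : Nat) : Int)) _ (by omega)]
    simp [gstep, List.append_assoc]

lemma gstep_spec : ∀ (k : Nat) (r : Int), 1 ≤ k → 0 ≤ r →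
    gstep k r = (0,
      List.replicate (k - (r % (k : Int)).toNat) (r / (k : Int))
        ++ List.replicate (r % (k : Int)).toNat (r / (k : Int) + 1)) := by
  intro k
  induction k with
  | zero => intro r h; exact absurd h (by omega)
  | succ n ih =>
    intro r _ hr
    have hpos : (0:Int) < (n:Int) + 1 := by positivity
    simp only [gstep, PySem.Int.floordiv_eq_ediv_of_pos hpos]
    push_cast
    set c := r / ((n:Int) + 1) with hc
    set m := r % ((n:Int) + 1) with hm
    have hmr : ((n:Int)+1) * c + m = r := Int.mul_ediv_add_emod r ((n:Int)+1)
    have hm0 : 0 ≤ m := Int.emod_nonneg r (by omega)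
    have hmlt : m < (n:Int) + 1 := Int.emod_lt_of_pos r hpos
    have hc0 : 0 ≤ c := Int.ediv_nonneg hr (by omega)
    have hnc : 0 ≤ (n:Int) * c := mul_nonneg (by positivity) hc0
    have hexp : ((n:Int)+1) * c = (n:Int) * c + c := by ring
    have hr' : r - c = m + (n:Int) * c := by linarith [hmr, hexp]
    rcases Nat.eq_zero_or_pos n with rfl | hn1
    · have hm00 : m = 0 := by omega
      have hx : c + m = r := by have h := hmr; push_cast at h; linarith
      have hcr : r - c = 0 := by omega
      simp [gstep, hm00, show c = r by omega]
    · have hn0 : ((n:Int)) ≠ 0 := by positivity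
      have ihr := ih (r - c) hn1 (by omega)
      rw [ihr]
      have hdiv0 : (r - c) / (n:Int) = m / (n:Int) + c := by
        rw [hr', Int.add_mul_ediv_left m c hn0]
      have hmod0 : (r - c) % (n:Int) = m % (n:Int) := by
        rw [hr', Int.add_mul_emod_self_left]
      by_cases hcase : m < (n:Int)
      · have h1 : m / (n:Int) = 0 := Int.ediv_eq_zero_of_lt hm0 hcase
        have h2 : m % (n:Int) = m := Int.emod_eq_of_lt hm0 hcase
        rw [hdiv0, hmod0, h1, h2, zero_add]
        have hnm : n + 1 - m.toNat = (n - m.toNat) + 1 := by omega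
        rw [hnm, List.replicate_succ, List.cons_append]
      · have hmn : m = (n:Int) := by omega
        have h1 : m / (n:Int) = 1 := by rw [hmn]; exact Int.ediv_self hn0
        have h2 : m % (n:Int) = 0 := by rw [hmn]; exact Int.emod_self
        rw [hdiv0, hmod0, h1, h2]
        have hmt : m.toNat = n := by omega
        have hnm : n + 1 - m.toNat = 1 := by omega
        rw [hnm, hmt]
        have hca : (1:Int) + c = c + 1 := by ring
        rw [hca]
        simp

lemma alt_nonpos (it pc : Int) (h : it ≤ 0) : get_iterations_partition_alt it pc = [] := by
  simp [get_iterations_partition_alt, h]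

lemma alt_small (it pc : Int) (h0 : 0 < it) (hlt : it < pvMinSize * pc) (hpc : 1 ≤ pc) :
    get_iterations_partition_alt it pc = (gstep pc.toNat it).2 := by
  have hM : pvMinSize * pc = 200000 * pc := by norm_num [pvMinSize]
  have hMpos : (0:Int) < pvMinSize * pc := by omega
  have hpcpos : (0:Int) < pc := by omega
  have hq : PySem.Int.floordiv it (pvMinSize * pc) = 0 := by
    rw [PySem.Int.floordiv_eq_ediv_of_pos hMpos]
    exact Int.ediv_eq_zero_of_lt h0.le hlt
  have hm0 : 0 ≤ it % pc := Int.emod_nonneg it (by omega)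
  have hmlt : it % pc < pc := Int.emod_lt_of_pos it hpcpos
  have hcast : ((pc.toNat : Nat) : Int) = pc := by omega
  have hspec := gstep_spec pc.toNat it (by omega) h0.le
  rw [hcast] at hspec
  simp only [get_iterations_partition_alt, hq, hspec, mul_zero, Int.toNat_zero,
    List.replicate_zero, List.nil_append, sub_zero,
    PySem.Int.floordiv_eq_ediv_of_pos hpcpos, PySem.Int.mod_eq_emod_of_pos hpcpos,
    if_neg (by omega : ¬ it ≤ 0), if_pos h0]
  have hcount : (pc - it % pc).toNat = pc.toNat - (it % pc).toNat := by omega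
  rw [hcount]

lemma alt_step (it pc : Int) (hge : pvMinSize * pc ≤ it) (hpc : 1 ≤ pc) :
    get_iterations_partition_alt it pc
      = List.replicate pc.toNat pvMinSize ++ get_iterations_partition_alt (it - pvMinSize * pc) pc := by
  have hM : pvMinSize * pc = 200000 * pc := by norm_num [pvMinSize]
  have hMpos : (0:Int) < pvMinSize * pc := by omega
  have hMne : pvMinSize * pc ≠ 0 := by omega
  have hpos : (0:Int) < it := by omega
  have hfd : PySem.Int.floordiv it (pvMinSize * pc) = it / (pvMinSize * pc) :=
    PySem.Int.floordiv_eq_ediv_of_pos hMpos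
  have hq1 : 1 ≤ it / (pvMinSize * pc) := by
    have h := (PySem.Int.le_floordiv_iff_mul_le hMpos).mpr (by omega : 1 * (pvMinSize * pc) ≤ it)
    rw [hfd] at h; exact h
  by_cases hit0 : it - pvMinSize * pc ≤ 0
  · have hitM : it = pvMinSize * pc := by omega
    have hqs : PySem.Int.floordiv it (pvMinSize * pc) = 1 := by
      rw [hfd, hitM]; exact Int.ediv_self hMne
    simp only [get_iterations_partition_alt, hqs, mul_one,
      if_neg (by omega : ¬ it ≤ 0), if_pos hit0]
    rw [show it - pvMinSize * pc = 0 by omega]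
    simp
  · have hfd' : PySem.Int.floordiv (it - pvMinSize * pc) (pvMinSize * pc)
        = it / (pvMinSize * pc) - 1 := by
      rw [PySem.Int.floordiv_eq_ediv_of_pos hMpos]
      rw [show it - pvMinSize * pc = it + (pvMinSize * pc) * (-1) by ring]
      rw [Int.add_mul_ediv_left it (-1) hMne]
      ring
    set q := it / (pvMinSize * pc) with hqdef
    have hpc0 : (0:Int) ≤ pc := by omega
    have hq'0 : 0 ≤ pc * (q - 1) := mul_nonneg hpc0 (by omega)
    have hringq : pc * q = pc + pc * (q - 1) := by ring
    have hcnt : (pc * q).toNat = pc.toNat + (pc * (q - 1)).toNat := by omega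
    have hrr : it - pvMinSize * pc - pvMinSize * pc * (q - 1) = it - pvMinSize * pc * q := by ring
    simp only [get_iterations_partition_alt, hfd, hfd',
      if_neg (by omega : ¬ it ≤ 0), if_neg hit0, hrr, hcnt, List.replicate_add]
    by_cases hr : it - pvMinSize * pc * q > 0
    · rw [if_pos hr, if_pos hr, List.append_assoc]
    · rw [if_neg hr, if_neg hr]

lemma loop_zero (pc : Int) : ∀ (f : Nat) (part : List Int),
    get_iterations_partitionLoop pc f 0 part = part := by
  intro f part
  cases f with
  | zero => rfl
  | succ f => rw [get_iterations_partitionLoop]; norm_num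

lemma loop_eq (pc : Int) (hpc : 1 ≤ pc) :
    ∀ (fuel : Nat) (it : Int) (part : List Int), it.toNat < fuel →
    get_iterations_partitionLoop pc fuel it part = part ++ get_iterations_partition_alt it pc := by
  intro fuel
  induction fuel with
  | zero => intro it part h; exact absurd h (by omega)
  | succ f ih =>
    intro it part h
    by_cases hpos : it > 0
    · rw [get_iterations_partitionLoop, if_pos hpos]
      by_cases hge : pvMinSize * pc ≤ it
      · rw [if_pos hge]
        have hM : pvMinSize * pc = 200000 * pc := by norm_num [pvMinSize]
        have hfold : (PySem.List.pyRange 0 pc 1).foldl (fun acc _ => acc ++ [pvMinSize]) part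
            = part ++ List.replicate pc.toNat pvMinSize := by
          rw [PySem.List.foldl_append_singleton_eq_map, List.map_const',
            PySem.List.length_pyRange_one]
          norm_num
        rw [hfold, ih (it - pvMinSize * pc) _ (by omega)]
        rw [alt_step it pc hge hpc, List.append_assoc]
      · rw [if_neg hge]
        have hcast : pc - 0 = ((pc.toNat : Nat) : Int) := by omega
        have hinner := inner_fold_eq_gstep pc pc.toNat 0 it part hcast
        simp only [hinner]
        have hg1 : (gstep pc.toNat it).1 = 0 := by
          rw [gstep_spec pc.toNat it (by omega) (by omega)]
        rw [hg1, loop_zero]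
        rw [alt_small it pc hpos (by omega) hpc]
    · rw [get_iterations_partitionLoop, if_neg hpos]
      rw [alt_nonpos it pc (by omega)]
      simp

-- ===== VERDICT (by name: the statement is the Claim_ definition above) =====
theorem get_iterations_partition_spec : Claim_equal_get_iterations_partition := by
  intro it pc _ hpre
  unfold Spec_get_iterations_partition get_iterations_partition
  rcases hpre with h | h
  · have h0 : it.toNat = 0 := by omega
    rw [h0, alt_nonpos it pc h]
    simp [get_iterations_partitionLoop, show ¬ it > 0 by omega]
  · simpa using loop_eq pc h (it.toNat + 1) it [] (by omega)
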